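-- pv_equiv track=rewrite | github.com/adamtry/advent-of-code-2022 | Day08: Treetop Tree House/index.py | get_visible_tree_coordinates_for_rows_cols
-- ===== SOURCE A (Python) =====
-- def get_visible_tree_indexes_for_line(tree_line: list[int]) -> set[int]:
--     visible_tree_indexes = set()
--
--     range_left_right = range(0, len(tree_line))
--     range_right_left = range(len(tree_line) - 1, 0, -1)
--
--     for my_range in [range_left_right, range_right_left]:
--         current_height = -1
--         for index in my_range:
--             tree_height = tree_line[index]
--             if tree_height > current_height:
--                 visible_tree_indexes.add(index)
--                 current_height = tree_height
--
--     return visible_tree_indexes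
--
-- def get_visible_tree_coordinates_for_rows_cols(row_list: list[list[int]], col_list: list[list[int]]) -> set[tuple[int, int]]:
--     visible_tree_coords: set[tuple] = set()
--     for x, row in enumerate(row_list):
--         y_values: set[int] = get_visible_tree_indexes_for_line(row)
--         for y in y_values:
--             visible_tree_coords.add((x, y))
--     for y, col in enumerate(col_list):
--         x_values: set[int] = get_visible_tree_indexes_for_line(col)
--         for x in x_values:
--             visible_tree_coords.add((x, y))
--
--     return visible_tree_coords
-- ===== SOURCE B (Python) =====
-- def _visible_indexes(line):
--     # index i is visible from an edge iff it is taller than every tree (and the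
--     # ground, height -1) between it and that edge
--     n = len(line)
--     left = [i for i in range(n) if line[i] > max([-1] + line[:i])]
--     right = [i for i in range(n - 1, -1, -1) if line[i] > max([-1] + line[i + 1:])]
--     return left + right
--
--
-- def get_visible_tree_coordinates_for_rows_cols(row_list, col_list):
--     coords = [(x, y) for x, row in enumerate(row_list) for y in _visible_indexes(row)]
--     coords += [(x, y) for y, col in enumerate(col_list) for x in _visible_indexes(col)]
--     return set(coords)
-- ===== Notes on version B (the rewrite author's own statement) =====
-- stated objective: alternative
-- what changed: A marks visible trees with two running-max sweeps per line and nested set-insertion loops; B instead tests each cell directly against the maximum of the slice between it and the edge (with the ground counted as height -1) and collects all coordinates by flat comprehensions into one set.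
import Mathlib
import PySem

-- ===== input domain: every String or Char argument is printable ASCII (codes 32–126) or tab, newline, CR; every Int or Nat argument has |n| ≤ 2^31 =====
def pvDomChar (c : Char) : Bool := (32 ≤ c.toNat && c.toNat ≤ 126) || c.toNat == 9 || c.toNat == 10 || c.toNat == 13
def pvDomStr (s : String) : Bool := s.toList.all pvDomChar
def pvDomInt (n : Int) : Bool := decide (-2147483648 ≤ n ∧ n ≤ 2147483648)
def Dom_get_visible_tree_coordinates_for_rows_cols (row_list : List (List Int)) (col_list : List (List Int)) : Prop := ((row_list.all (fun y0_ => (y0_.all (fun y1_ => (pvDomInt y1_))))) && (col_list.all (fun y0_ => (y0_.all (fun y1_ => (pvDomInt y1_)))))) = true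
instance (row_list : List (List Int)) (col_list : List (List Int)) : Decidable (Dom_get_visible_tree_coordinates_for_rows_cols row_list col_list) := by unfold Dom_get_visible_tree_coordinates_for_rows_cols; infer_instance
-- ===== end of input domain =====

-- B replaces A's two running-max sweeps per line by a per-cell "taller than every tree
-- (and the ground, height -1) towards an edge" slice test, collected by flat
-- comprehensions into one set: an alternative decomposition of the same task.

-- ===== PORT A =====
def get_visible_tree_indexes_for_line (tree_line : List Int) : PySem.Set Int :=
  let range_left_right := PySem.List.pyRange 0 (tree_line.length : Int) 1
  let range_right_left := PySem.List.pyRange ((tree_line.length : Int) - 1) 0 (-1)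
  [range_left_right, range_right_left].foldl (fun visible my_range =>
    (my_range.foldl (fun st index =>
        -- tree_line[index]: every index produced by the ranges is in range, so the default is never used
        let tree_height := PySem.List.pyGetD tree_line index 0
        if tree_height > st.1 then (tree_height, PySem.Set.add st.2 index) else st)
      ((-1 : Int), visible)).2) PySem.Set.empty

def get_visible_tree_coordinates_for_rows_cols (row_list : List (List Int)) (col_list : List (List Int)) : List (Int × Int) :=
  let afterRows := (PySem.List.enumerate row_list).foldl (fun visible_tree_coords xr =>
    (get_visible_tree_indexes_for_line xr.2).foldl (fun s y => PySem.Set.add s (xr.1, y)) visible_tree_coords)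
    PySem.Set.empty
  (PySem.List.enumerate col_list).foldl (fun visible_tree_coords yc =>
    (get_visible_tree_indexes_for_line yc.2).foldl (fun s x => PySem.Set.add s (x, yc.1)) visible_tree_coords)
    afterRows

-- ===== PORT B =====
def visibleIndexes (line : List Int) : List Int :=
  let n : Int := line.length
  let left := (PySem.List.pyRange 0 n 1).filter (fun i =>
    decide (PySem.List.pyGetD line i 0 > PySem.List.maxD ((-1) :: PySem.List.slice line none (some i)) (fun y => y) (-1)))
  let right := (PySem.List.pyRange (n - 1) (-1) (-1)).filter (fun i =>
    decide (PySem.List.pyGetD line i 0 > PySem.List.maxD ((-1) :: PySem.List.slice line (some (i + 1)) none) (fun y => y) (-1)))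
  left ++ right

def get_visible_tree_coordinates_for_rows_cols_alt (row_list : List (List Int)) (col_list : List (List Int)) : List (Int × Int) :=
  let coords := (PySem.List.enumerate row_list).flatMap (fun xr => (visibleIndexes xr.2).map (fun y => (xr.1, y)))
    ++ (PySem.List.enumerate col_list).flatMap (fun yc => (visibleIndexes yc.2).map (fun x => (x, yc.1)))
  PySem.Set.ofList coords

-- ===== PRECONDITION & SPEC =====
def Spec_get_visible_tree_coordinates_for_rows_cols (row_list : List (List Int)) (col_list : List (List Int)) (out : List (Int × Int)) : Prop := out = get_visible_tree_coordinates_for_rows_cols_alt row_list col_list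
instance (row_list : List (List Int)) (col_list : List (List Int)) (out : List (Int × Int)) : Decidable (Spec_get_visible_tree_coordinates_for_rows_cols row_list col_list out) := by unfold Spec_get_visible_tree_coordinates_for_rows_cols; infer_instance

-- ===== CLAIM (what is proved, stated in full; the proofs are below) =====
def Claim_equal_get_visible_tree_coordinates_for_rows_cols : Prop := ∀ (row_list : List (List Int)) (col_list : List (List Int)), Dom_get_visible_tree_coordinates_for_rows_cols row_list col_list → Spec_get_visible_tree_coordinates_for_rows_cols row_list col_list (get_visible_tree_coordinates_for_rows_cols row_list col_list)

-- ===== LEMMAS AND PROOFS =====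
lemma foldl_max_pull (t : List Int) : ∀ (a b : Int), t.foldl max (max a b) = max b (t.foldl max a) := by
  induction t with
  | nil => intro a b; simp [max_comm]
  | cons c t ih =>
    intro a b
    have h1 : max (max a b) c = max (max a c) b := by simp [max_comm, max_left_comm]
    simp only [List.foldl_cons, h1, ih]

lemma take_fold_succ (line : List Int) (j : Nat) (hj : j < line.length) :
    (line.take (j + 1)).foldl max (-1) = max ((line.take j).foldl max (-1)) (line.getD j 0) := by
  have h : line.take (j+1) = line.take j ++ [line.getD j 0] := by
    rw [List.take_add_one, List.getElem?_eq_getElem hj]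
    simp [List.getD, List.getElem?_eq_getElem hj]
  simp [h, List.foldl_append]

lemma drop_fold_succ (line : List Int) (j : Nat) (hj : j < line.length) :
    (line.drop j).foldl max (-1) = max ((line.drop (j + 1)).foldl max (-1)) (line.getD j 0) := by
  have h : line.drop j = line.getD j 0 :: line.drop (j+1) := by
    rw [List.drop_eq_getElem_cons hj]; simp [List.getD, List.getElem?_eq_getElem hj]
  rw [h, List.foldl_cons, foldl_max_pull, max_comm]

def pL (line : List Int) (k : Nat) : Bool := decide (line.getD k 0 > (line.take k).foldl max (-1))
def pR (line : List Int) (k : Nat) : Bool := decide (line.getD k 0 > (line.drop (k + 1)).foldl max (-1))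

lemma leftPass (line : List Int) : ∀ (len s' : Nat), s' + len ≤ line.length → ∀ (s : PySem.Set Int),
    ((List.range' s' len).map (fun (k : Nat) => (k : Int))).foldl
      (fun st index =>
        if PySem.List.pyGetD line index 0 > st.1 then (PySem.List.pyGetD line index 0, PySem.Set.add st.2 index) else st)
      ((line.take s').foldl max (-1), s)
    = ((line.take (s' + len)).foldl max (-1),
       PySem.Set.update s (((List.range' s' len).filter (pL line)).map (fun (k : Nat) => (k : Int)))) := by
  intro len
  induction len with
  | zero => intro s' _ s; simp [PySem.Set.update_nil]
  | succ len ih =>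
    intro s' hle s
    have hj : s' < line.length := by omega
    have harr : s' + (len + 1) = s' + 1 + len := by omega
    rw [List.range'_succ, harr]
    by_cases hgt : line.getD s' 0 > (line.take s').foldl max (-1)
    · have hpl : pL line s' = true := decide_eq_true hgt
      have hmax : (line.take (s' + 1)).foldl max (-1) = line.getD s' 0 := by
        rw [take_fold_succ line s' hj]; omega
      simp only [List.map_cons, List.foldl_cons, List.filter_cons, PySem.List.pyGetD_natCast,
        hpl, hgt, if_true, PySem.Set.update_cons]
      rw [← hmax, ih (s'+1) (by omega) (PySem.Set.add s (s' : Int))]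
    · have hpl : pL line s' = false := decide_eq_false hgt
      have hmax : (line.take (s' + 1)).foldl max (-1) = (line.take s').foldl max (-1) := by
        rw [take_fold_succ line s' hj]; omega
      simp only [List.map_cons, List.foldl_cons, List.filter_cons, PySem.List.pyGetD_natCast,
        hpl, hgt, if_false, Bool.false_eq_true, ite_false]
      rw [← hmax, ih (s'+1) (by omega) s]

lemma rightPass (line : List Int) (s' : Nat) : ∀ (len : Nat), s' + len ≤ line.length → ∀ (s : PySem.Set Int),
    (((List.range' s' len).reverse).map (fun (k : Nat) => (k : Int))).foldl
      (fun st index =>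
        if PySem.List.pyGetD line index 0 > st.1 then (PySem.List.pyGetD line index 0, PySem.Set.add st.2 index) else st)
      ((line.drop (s' + len)).foldl max (-1), s)
    = ((line.drop s').foldl max (-1),
       PySem.Set.update s ((((List.range' s' len).reverse).filter (pR line)).map (fun (k : Nat) => (k : Int)))) := by
  intro len
  induction len with
  | zero => intro _ s; simp [PySem.Set.update_nil]
  | succ len ih =>
    intro hle s
    have hj : s' + len < line.length := by omega
    have hrev : (List.range' s' (len + 1)).reverse = (s' + len) :: (List.range' s' len).reverse := by
      rw [List.range'_concat]; simp
    rw [hrev, show s' + (len + 1) = s' + len + 1 from by omega]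
    by_cases hgt : line.getD (s' + len) 0 > (line.drop (s' + len + 1)).foldl max (-1)
    · have hpr : pR line (s' + len) = true := decide_eq_true hgt
      have hmax : (line.drop (s' + len)).foldl max (-1) = line.getD (s' + len) 0 := by
        rw [drop_fold_succ line (s' + len) hj]; omega
      simp only [List.map_cons, List.foldl_cons, List.filter_cons, PySem.List.pyGetD_natCast,
        hpr, hgt, if_true, PySem.Set.update_cons]
      rw [← hmax, ih (by omega) (PySem.Set.add s ((s' + len : Nat) : Int))]
    · have hpr : pR line (s' + len) = false := decide_eq_false hgt
      have hmax : (line.drop (s' + len)).foldl max (-1) = (line.drop (s' + len + 1)).foldl max (-1) := by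
        rw [drop_fold_succ line (s' + len) hj]; omega
      simp only [List.map_cons, List.foldl_cons, List.filter_cons, PySem.List.pyGetD_natCast,
        hpr, hgt, if_false, Bool.false_eq_true, ite_false]
      rw [← hmax, ih (by omega) s]

def lhits (line : List Int) : List Int :=
  ((List.range' 0 line.length).filter (pL line)).map (fun (k : Nat) => (k : Int))
def rhA (line : List Int) : List Int :=
  (((List.range' 1 (line.length - 1)).reverse).filter (pR line)).map (fun (k : Nat) => (k : Int))
def rhB (line : List Int) : List Int :=
  (((List.range' 0 line.length).reverse).filter (pR line)).map (fun (k : Nat) => (k : Int))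

lemma aline_eq (line : List Int) :
    get_visible_tree_indexes_for_line line
    = PySem.Set.update (PySem.Set.update PySem.Set.empty (lhits line)) (rhA line) := by
  have hr1 : PySem.List.pyRange 0 (line.length : Int) 1
      = (List.range' 0 line.length).map (fun (k : Nat) => (k : Int)) := by
    rw [PySem.List.pyRange_zero_nat, List.range_eq_range']
  have L := leftPass line line.length 0 (by omega) PySem.Set.empty
  simp only [List.take_zero, List.foldl_nil, Nat.zero_add] at L
  rcases Nat.eq_zero_or_pos line.length with hn | hn
  · have hline : line = [] := List.length_eq_zero_iff.mp hn
    subst hline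
    simp [get_visible_tree_indexes_for_line, lhits, rhA, PySem.List.pyRange_neg_one_eq_nil,
      PySem.List.pyRange_zero_nat]
  · have hr2 : PySem.List.pyRange ((line.length : Int) - 1) 0 (-1)
        = ((List.range' 1 (line.length - 1)).reverse).map (fun (k : Nat) => (k : Int)) := by
      rw [PySem.List.pyRange_neg_one_eq_reverse]
      rw [show (0 : Int) + 1 = 1 from by norm_num, show (line.length : Int) - 1 + 1 = (line.length : Int) from by ring]
      rw [PySem.List.pyRange_one, List.map_reverse]
      congr 1
      rw [List.range'_eq_map_range, List.map_map]
      rw [show ((line.length : Int) - 1).toNat = line.length - 1 from by omega]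
      apply List.map_congr_left
      intro k _
      simp
    have R := rightPass line 1 (line.length - 1)
      (by omega) (PySem.Set.update PySem.Set.empty
        (((List.range' 0 line.length).filter (pL line)).map (fun (k : Nat) => (k : Int))))
    rw [show 1 + (line.length - 1) = line.length from by omega, List.drop_length, List.foldl_nil] at R
    unfold get_visible_tree_indexes_for_line
    simp only [List.foldl_cons, List.foldl_nil, lhits, rhA]
    rw [hr1, L, hr2, R]

lemma maxD_neg_one_cons (l : List Int) :
    PySem.List.maxD ((-1) :: l) (fun y => y) (-1) = l.foldl max (-1) := by
  simp [PySem.List.maxD, PySem.List.max?_id_cons]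

lemma bline_eq (line : List Int) : visibleIndexes line = lhits line ++ rhB line := by
  simp only [visibleIndexes, lhits, rhB]
  congr 1
  · rw [PySem.List.pyRange_zero_nat, List.range_eq_range', List.filter_map]
    congr 1
    apply List.filter_congr
    intro k _
    simp only [Function.comp_apply, PySem.List.pyGetD_natCast, PySem.List.slice_to_natCast,
      maxD_neg_one_cons, pL]
  · rw [PySem.List.pyRange_neg_one_eq_reverse,
      show (-1 : Int) + 1 = 0 from by norm_num,
      show (line.length : Int) - 1 + 1 = (line.length : Int) from by ring,
      PySem.List.pyRange_zero_nat, List.range_eq_range', ← List.map_reverse, List.filter_map]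
    congr 1
    apply List.filter_congr
    intro k _
    have hc : ((k : Int) + 1) = ((k + 1 : Nat) : Int) := by push_cast; ring
    simp only [Function.comp_apply, PySem.List.pyGetD_natCast, hc, PySem.List.slice_from_natCast,
      maxD_neg_one_cons, pR]

lemma ofList_map_ofList {α β : Type} [BEq α] [LawfulBEq α] [BEq β] [LawfulBEq β]
    (l : List α) (f : α → β) :
    PySem.Set.ofList ((PySem.Set.ofList l).map f) = PySem.Set.ofList (l.map f) := by
  induction l using List.reverseRecOn with
  | nil => simp [PySem.Set.ofList_nil]
  | append_singleton l a ih =>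
    rw [PySem.Set.ofList_append_singleton, List.map_append, List.map_singleton,
      PySem.Set.ofList_append_singleton]
    by_cases h : a ∈ PySem.Set.ofList l
    · rw [PySem.Set.add_of_mem h, ih]
      have hf : f a ∈ PySem.Set.ofList (l.map f) := by
        rw [PySem.Set.mem_ofList]
        exact List.mem_map_of_mem ((PySem.Set.mem_ofList l a).mp h)
      rw [PySem.Set.add_of_mem hf]
    · rw [PySem.Set.add_of_not_mem h, List.map_append, List.map_singleton,
        PySem.Set.ofList_append_singleton, ih]

lemma rhB_split (line : List Int) (hn : 1 ≤ line.length) :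
    rhB line = rhA line ++ (if pR line 0 then [(0 : Int)] else []) := by
  unfold rhB rhA
  rw [show line.length = (line.length - 1) + 1 from by omega, List.range'_succ]
  simp only [Nat.zero_add, List.reverse_cons, List.filter_append, List.map_append,
    show line.length - 1 + 1 - 1 = line.length - 1 from by omega]
  congr 1
  by_cases h0 : pR line 0
  · simp [h0]
  · simp [h0]

lemma zero_mem_lhits (line : List Int) (hn : 1 ≤ line.length) (h0 : pR line 0 = true) :
    (0 : Int) ∈ lhits line := by
  have hgt : line.getD 0 0 > (line.drop 1).foldl max (-1) := of_decide_eq_true h0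
  have hge : (-1 : Int) ≤ (line.drop 1).foldl max (-1) := (PySem.List.le_foldl_max _ _).1
  have hpl : pL line 0 = true := by
    apply decide_eq_true
    simp only [List.take_zero, List.foldl_nil]
    omega
  unfold lhits
  refine List.mem_map.mpr ⟨0, List.mem_filter.mpr ⟨?_, hpl⟩, rfl⟩
  exact List.mem_range'_1.mpr ⟨Nat.le_refl 0, by omega⟩

lemma perLineCoords (line : List Int) (f : Int → Int × Int) (s : PySem.Set (Int × Int)) :
    PySem.Set.update s ((PySem.Set.update (PySem.Set.update PySem.Set.empty (lhits line)) (rhA line)).map f)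
    = PySem.Set.update s ((visibleIndexes line).map f) := by
  rw [PySem.Set.update_empty, ← PySem.Set.ofList_append, bline_eq,
    PySem.Set.update_eq_append_filter s, PySem.Set.update_eq_append_filter s]
  have key : PySem.Set.ofList ((PySem.Set.ofList (lhits line ++ rhA line)).map f)
      = PySem.Set.ofList ((lhits line ++ rhB line).map f) := by
    rw [ofList_map_ofList]
    rcases Nat.eq_zero_or_pos line.length with hn | hn
    · unfold rhA rhB
      rw [hn]
      rfl
    · rw [rhB_split line hn]
      by_cases h0 : pR line 0
      · rw [if_pos h0]
        have hf : f 0 ∈ PySem.Set.ofList ((lhits line ++ rhA line).map f) := by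
          rw [PySem.Set.mem_ofList]
          exact List.mem_map_of_mem (List.mem_append_left _ (zero_mem_lhits line hn h0))
        conv_rhs => rw [← List.append_assoc, List.map_append, List.map_singleton,
          PySem.Set.ofList_append_singleton]
        rw [PySem.Set.add_of_mem hf]
      · simp [h0]
  rw [key]

lemma foldl_update_flatMap {γ β : Type} [BEq β] (l : List γ) (g : γ → List β) :
    ∀ (s : PySem.Set β),
      l.foldl (fun s x => PySem.Set.update s (g x)) s = PySem.Set.update s (l.flatMap g) := by
  induction l with
  | nil => intro s; simp [PySem.Set.update_nil]
  | cons a l ih => intro s; simp [List.flatMap_cons, PySem.Set.update_append, ih]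

lemma main_eq (row_list col_list : List (List Int)) :
    get_visible_tree_coordinates_for_rows_cols row_list col_list
    = get_visible_tree_coordinates_for_rows_cols_alt row_list col_list := by
  unfold get_visible_tree_coordinates_for_rows_cols get_visible_tree_coordinates_for_rows_cols_alt
  have hrow : (fun (s : PySem.Set (Int × Int)) (xr : Int × List Int) =>
      (get_visible_tree_indexes_for_line xr.2).foldl (fun s y => PySem.Set.add s (xr.1, y)) s)
      = (fun s xr => PySem.Set.update s ((visibleIndexes xr.2).map (fun y => (xr.1, y)))) := by
    funext s xr
    rw [← PySem.Set.update_map_eq_foldl_add, aline_eq, perLineCoords]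
  have hcol : (fun (s : PySem.Set (Int × Int)) (yc : Int × List Int) =>
      (get_visible_tree_indexes_for_line yc.2).foldl (fun s x => PySem.Set.add s (x, yc.1)) s)
      = (fun s yc => PySem.Set.update s ((visibleIndexes yc.2).map (fun x => (x, yc.1)))) := by
    funext s yc
    rw [← PySem.Set.update_map_eq_foldl_add, aline_eq, perLineCoords]
  rw [hrow, hcol, foldl_update_flatMap, foldl_update_flatMap, PySem.Set.update_empty,
    ← PySem.Set.ofList_append]

-- ===== VERDICT (by name: the statement is the Claim_ definition above) =====
theorem get_visible_tree_coordinates_for_rows_cols_spec : Claim_equal_get_visible_tree_coordinates_for_rows_cols := by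
  intro row_list col_list _
  unfold Spec_get_visible_tree_coordinates_for_rows_cols
  exact main_eq row_list col_list
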